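-- pv_equiv track=rewrite | github.com/Hotsumm/BOJ-Programmers-Solution | Programmers/Level3/숫자게임.py | solution
-- ===== SOURCE A (Python) =====
-- from collections import deque
--
-- def solution(A, B):
--     answer = 0
--     A.sort()
--     B.sort()
--     B = deque(B)
--
--     for a in A:
--         while B:
--             temp = B.popleft()
--             if a<temp:
--                 answer += 1
--                 break
--
--     return answer
-- ===== SOURCE B (Python) =====
-- def solution(A, B):
--     # Descending merged sweep: same return value as the original; also sorts
--     # both argument lists in place (matching the original's side effect on A,
--     # and on B before it is rebound to a deque there).
--     A.sort()
--     B.sort()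
--     answer = 0
--     pool = 0
--     i, j = len(A) - 1, len(B) - 1
--     while i >= 0 or j >= 0:
--         if j < 0 or (i >= 0 and A[i] >= B[j]):
--             # A-event (processed before B at equal values: match needs a < b)
--             if pool > 0:
--                 answer += 1
--                 pool -= 1
--             i -= 1
--         else:
--             # B-event: B[j] is strictly larger than every remaining A value
--             pool += 1
--             j -= 1
--     return answer
-- ===== Notes on version B (the rewrite author's own statement) =====
-- stated objective: alternative
-- what changed: Replaces the ascending for-loop-over-A with an inner deque-popping while by a single descending merged sweep over both sorted lists that maintains only a scalar pool of larger B values and the answer.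
import Mathlib
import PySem

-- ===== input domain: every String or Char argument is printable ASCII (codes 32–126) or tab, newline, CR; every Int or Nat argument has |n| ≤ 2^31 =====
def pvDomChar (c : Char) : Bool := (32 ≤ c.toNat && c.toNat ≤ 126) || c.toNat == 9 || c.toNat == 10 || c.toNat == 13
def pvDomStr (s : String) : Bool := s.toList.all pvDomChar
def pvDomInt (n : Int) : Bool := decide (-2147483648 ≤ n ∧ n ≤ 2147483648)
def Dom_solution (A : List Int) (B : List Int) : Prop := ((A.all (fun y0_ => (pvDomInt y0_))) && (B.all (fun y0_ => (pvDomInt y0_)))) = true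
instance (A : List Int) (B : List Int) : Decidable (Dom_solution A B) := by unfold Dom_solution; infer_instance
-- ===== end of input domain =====

-- B replaces A's ascending for/deque greedy with a single descending merged sweep and a scalar
-- pool (objective: alternative decomposition). Equivalence is about the RETURN value; both
-- Pythons also sort the argument lists in place.

-- ===== PORT A =====
-- 'for a in A: while B: temp = B.popleft(); if a < temp: answer += 1; break':
-- structural recursion over the sorted A with the B deque as state; on 'a < temp' the
-- answer contribution is 1 and the outer loop moves on with the remaining deque.
def solGo : List Int → List Int → Int
  | [], _ => 0
  | _ :: as, [] => 0 + solGo as []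
  | a :: as, b :: bs =>
      if a < b then 1 + solGo as bs
      else solGo (a :: as) bs
  termination_by as bs => (as.length, bs.length)

def solution (A : List Int) (B : List Int) : Int :=
  solGo (PySem.List.sorted A (fun x => x) false) (PySem.List.sorted B (fun x => x) false)

-- ===== PORT B =====
-- Source B's while loop over indices i, j descending both sorted lists is the structural
-- recursion over the REVERSED sorted lists (descending order), with pool and answer as state.
def sweep : Int → Int → List Int → List Int → Int
  | _, ans, [], [] => ans
  | pool, ans, [], _ :: y => sweep (pool + 1) ans [] y
  | pool, ans, _ :: x, [] =>
      if pool > 0 then sweep (pool - 1) (ans + 1) x [] else sweep pool ans x []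
  | pool, ans, a :: x, b :: y =>
      if a ≥ b then
        (if pool > 0 then sweep (pool - 1) (ans + 1) x (b :: y) else sweep pool ans x (b :: y))
      else sweep (pool + 1) ans (a :: x) y
  termination_by _ _ x y => x.length + y.length

def solution_alt (A : List Int) (B : List Int) : Int :=
  sweep 0 0 (PySem.List.sorted A (fun x => x) false).reverse
            (PySem.List.sorted B (fun x => x) false).reverse

-- ===== PRECONDITION & SPEC =====
def Spec_solution (A : List Int) (B : List Int) (out : Int) : Prop := out = solution_alt A B
instance (A : List Int) (B : List Int) (out : Int) : Decidable (Spec_solution A B out) := by unfold Spec_solution; infer_instance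

-- ===== CLAIM (what is proved, stated in full; the proofs are below) =====
def Claim_equal_solution : Prop := ∀ (A : List Int) (B : List Int), Dom_solution A B → Spec_solution A B (solution A B)

-- ===== LEMMAS AND PROOFS =====

theorem solGo_nonneg (as bs : List Int) : 0 ≤ solGo as bs := by
  induction as, bs using solGo.induct with
  | case1 => simp [solGo]
  | case2 a as ih => simpa [solGo] using ih
  | case3 a as b bs h ih => simp [solGo, h]; omega
  | case4 a as b bs h ih => simpa [solGo, h] using ih

theorem solGo_le_len (as bs : List Int) : solGo as bs ≤ (as.length : Int) := by
  induction as, bs using solGo.induct with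
  | case1 => simp [solGo]
  | case2 a as ih => simp [solGo]; omega
  | case3 a as b bs h ih => simp [solGo, h]; omega
  | case4 a as b bs h ih => simp only [solGo, if_neg h]; simp at ih ⊢; omega


theorem solGo_nil_right (as : List Int) : solGo as [] = 0 := by
  induction as with
  | nil => simp [solGo]
  | cons x xs ih => simpa [solGo] using ih

theorem solGo_append_big_a (a : Int) (as bs : List Int) (h : ∀ b ∈ bs, ¬ a < b) :
    solGo (as ++ [a]) bs = solGo as bs := by
  induction bs generalizing as with
  | nil =>
    induction as with
    | nil => simp [solGo]
    | cons a' as' ih' => simpa [solGo] using ih'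
  | cons b bs ih =>
    cases as with
    | nil =>
      simp only [List.nil_append, solGo, if_neg (h b (by simp))]
      have := ih [] (fun c hc => h c (by simp [hc]))
      simpa [solGo] using this
    | cons a' as' =>
      by_cases hab : a' < b
      · simp only [List.cons_append, solGo, if_pos hab]
        rw [ih as' (fun c hc => h c (by simp [hc]))]
      · simp only [List.cons_append, solGo, if_neg hab]
        exact ih (a' :: as') (fun c hc => h c (by simp [hc]))

theorem solGo_append_big_b (b : Int) (as bs : List Int) (h : ∀ a ∈ as, a < b) :
    solGo as (bs ++ [b]) = min (as.length : Int) (solGo as bs + 1) := by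
  induction bs generalizing as with
  | nil =>
    cases as with
    | nil => simp [solGo]
    | cons a' as' =>
      simp [solGo, h a' (by simp), solGo_nil_right]
  | cons b' bs' ih =>
    cases as with
    | nil => simp [solGo]
      -- need: solGo [] anything = 0
    | cons a' as' =>
      by_cases hab : a' < b'
      · simp only [List.cons_append, solGo, if_pos hab]
        rw [ih as' (fun c hc => h c (by simp [hc]))]
        have := solGo_le_len as' bs'
        simp; omega
      · simp only [List.cons_append, solGo, if_neg hab]
        rw [ih (a' :: as') h]

theorem sweep_eq (pool ans : Int) (x y : List Int) : 0 ≤ pool →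
    x.Pairwise (fun a b => b ≤ a) → y.Pairwise (fun a b => b ≤ a) →
    sweep pool ans x y = ans + min (x.length : Int) (pool + solGo x.reverse y.reverse) := by
  induction pool, ans, x, y using sweep.induct with
  | case1 => intro hp _ _; simp [sweep, solGo]; omega
  | case2 pool ans b y ih =>
    intro hp _ hy
    rw [sweep, ih (by omega) List.Pairwise.nil (List.Pairwise.sublist (List.sublist_cons_self b y) hy)]
    simp [solGo]
    omega
  | case3 pool ans a x h ih =>
    intro hp hx _
    rw [sweep, if_pos h, ih (by omega) (List.Pairwise.sublist (List.sublist_cons_self a x) hx) List.Pairwise.nil]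
    simp [solGo_nil_right]
    omega
  | case4 pool ans a x h ih =>
    intro hp hx _
    rw [sweep, if_neg h, ih (by omega) (List.Pairwise.sublist (List.sublist_cons_self a x) hx) List.Pairwise.nil]
    simp [solGo_nil_right]
    omega
  | case5 pool ans a x b y hab h ih =>
    intro hp hx hy
    rw [sweep, if_pos hab, if_pos h, ih (by omega) (List.Pairwise.sublist (List.sublist_cons_self a x) hx) hy]
    have hbig : ∀ c ∈ (b :: y).reverse, ¬ a < c := by
      intro c hc
      rcases List.mem_cons.1 (List.mem_reverse.1 hc) with h1 | h1
      · omega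
      · have := (List.pairwise_cons.1 hy).1 c h1
        omega
    have := solGo_append_big_a a x.reverse (b :: y).reverse hbig
    have hg0 := solGo_nonneg x.reverse (b :: y).reverse
    simp only [List.reverse_cons] at this ⊢
    rw [this]
    simp
    omega
  | case6 pool ans a x b y hab h ih =>
    intro hp hx hy
    rw [sweep, if_pos hab, if_neg h, ih (by omega) (List.Pairwise.sublist (List.sublist_cons_self a x) hx) hy]
    have hbig : ∀ c ∈ (b :: y).reverse, ¬ a < c := by
      intro c hc
      rcases List.mem_cons.1 (List.mem_reverse.1 hc) with h1 | h1
      · omega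
      · have := (List.pairwise_cons.1 hy).1 c h1
        omega
    have := solGo_append_big_a a x.reverse (b :: y).reverse hbig
    have hle := solGo_le_len x.reverse (b :: y).reverse
    simp only [List.reverse_cons] at this ⊢
    rw [this]
    simp at hle ⊢
    omega
  | case7 pool ans a x b y hab ih =>
    intro hp hx hy
    rw [sweep, if_neg hab, ih (by omega) hx (List.Pairwise.sublist (List.sublist_cons_self b y) hy)]
    have hbig : ∀ c ∈ (a :: x).reverse, c < b := by
      intro c hc
      rcases List.mem_cons.1 (List.mem_reverse.1 hc) with h1 | h1
      · omega
      · have := (List.pairwise_cons.1 hx).1 c h1; omega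
    have := solGo_append_big_b b (a :: x).reverse y.reverse hbig
    have hg0 := solGo_nonneg (a :: x).reverse y.reverse
    simp only [List.reverse_cons] at this ⊢
    rw [this]
    simp at hg0 ⊢
    omega

-- ===== VERDICT (by name: the statement is the Claim_ definition above) =====
theorem solution_spec : Claim_equal_solution := by
  intro A B _
  unfold Spec_solution solution solution_alt
  rw [sweep_eq 0 0 _ _ le_rfl
        (List.pairwise_reverse.2 (by simpa using PySem.List.sorted_pairwise (xs := A) (key := fun x => x)))
        (List.pairwise_reverse.2 (by simpa using PySem.List.sorted_pairwise (xs := B) (key := fun x => x)))]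
  have hle := solGo_le_len (PySem.List.sorted A (fun x => x) false) (PySem.List.sorted B (fun x => x) false)
  simp only [List.reverse_reverse, List.length_reverse, zero_add]
  omega
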